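-- pv_equiv track=rewrite | github.com/tgrishanina/codewars | card_game.py | card_game
-- ===== SOURCE A (Python) =====
-- def card_game(n):
--     cards_total = []
--     while n != 0:
--         if n % 2 == 0 and (n % 4 != 0 or n == 4):
--             cards = n//2
--             cards_total.append(cards)
--             n = n//2
--         else:
--             cards = 1
--             cards_total.append(cards)
--             n = n-1
--     return sum(cards_total[c] for c in range(0, len(cards_total), 2))
-- ===== SOURCE B (Python) =====
-- def card_game(n):
--     # Recursive pair-valued formulation: f(m) = (sum of even-indexed cards,
--     # sum of odd-indexed cards) of the game trace starting at m. Cases on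
--     # m mod 4 let the n%4==0 case consume three moves (1, 1, halve) at once,
--     # so there is no per-move loop, no list and no parity flag.
--     def f(m):
--         if m == 0:
--             return (0, 0)
--         if m % 2 == 1:
--             e, o = f(m - 1)
--             return (1 + o, e)
--         if m % 4 == 2 or m == 4:
--             h = m // 2
--             e, o = f(h)
--             return (h + o, e)
--         # m % 4 == 0, m != 4: moves are 1, 1, (m-2)//2, then continue at (m-2)//2
--         h = (m - 2) // 2
--         e, o = f(h)
--         return (1 + h + o, 1 + e)
--     return f(n)[0]
-- ===== Notes on version B (the rewrite author's own statement) =====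
-- stated objective: alternative
-- what changed: B replaces A's move-by-move loop that builds a list and then sums its even indices with a pair-valued recursion f(m)=(evenSum,oddSum) that cases on m mod 4, consuming three moves at once in the n%4==0 branch and swapping the pair components instead of tracking positions.
import Mathlib
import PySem

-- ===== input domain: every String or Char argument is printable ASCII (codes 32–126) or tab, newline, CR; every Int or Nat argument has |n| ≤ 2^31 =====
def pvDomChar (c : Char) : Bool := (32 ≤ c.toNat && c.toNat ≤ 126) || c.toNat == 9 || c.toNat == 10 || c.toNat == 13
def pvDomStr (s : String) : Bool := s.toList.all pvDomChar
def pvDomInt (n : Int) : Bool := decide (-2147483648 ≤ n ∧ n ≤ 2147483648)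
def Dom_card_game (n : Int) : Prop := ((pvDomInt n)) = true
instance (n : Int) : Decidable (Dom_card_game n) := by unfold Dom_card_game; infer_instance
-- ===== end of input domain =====

-- B replaces A's move-by-move simulation (build a list of cards, then sum the
-- even indices) with a pair-valued recursion on n casing on n mod 4
-- (objective: alternative; same asymptotic cost).

-- ===== PORT A =====
-- A's while loop, building cards_total; fuel = n.toNat + 1 only makes the
-- recursion total (for n ≥ 0 the loop runs at most n times, so fuel never runs out).
def buildA (fuel : Nat) (n : Int) : List Int :=
  match fuel with
  | 0 => []
  | fuel + 1 =>
    if n = 0 then []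
    else if PySem.Int.mod n 2 = 0 ∧ (PySem.Int.mod n 4 ≠ 0 ∨ n = 4) then
      PySem.Int.floordiv n 2 :: buildA fuel (PySem.Int.floordiv n 2)
    else
      1 :: buildA fuel (n - 1)

def card_game (n : Int) : Int :=
  let cards_total := buildA (n.toNat + 1) n
  (PySem.List.pyRange 0 (cards_total.length : Int) 2).foldl
    (fun acc c => acc + PySem.List.pyGetD cards_total c 0) 0

-- ===== PORT B =====
-- Source B's f(m): (sum of even-indexed cards, sum of odd-indexed cards) of the
-- trace from m; fuel = n.toNat + 1 only makes the recursion total (every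
-- recursive argument is smaller and nonnegative).
def fB (fuel : Nat) (m : Int) : Int × Int :=
  match fuel with
  | 0 => (0, 0)
  | fuel + 1 =>
    if m = 0 then (0, 0)
    else if PySem.Int.mod m 2 = 1 then
      let p := fB fuel (m - 1)
      (1 + p.2, p.1)
    else if PySem.Int.mod m 4 = 2 ∨ m = 4 then
      let h := PySem.Int.floordiv m 2
      let p := fB fuel h
      (h + p.2, p.1)
    else
      let h := PySem.Int.floordiv (m - 2) 2
      let p := fB fuel h
      (1 + h + p.2, 1 + p.1)

def card_game_alt (n : Int) : Int := (fB (n.toNat + 1) n).1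

-- ===== PRECONDITION & SPEC =====
-- Pre_ excludes n < 0, on which Python A's while loop never terminates.
def Pre_card_game (n : Int) : Prop := 0 ≤ n
instance (n : Int) : Decidable (Pre_card_game n) := by unfold Pre_card_game; infer_instance
def pvWitness_card_game : Int := (10)

def Spec_card_game (n : Int) (out : Int) : Prop := out = card_game_alt n
instance (n : Int) (out : Int) : Decidable (Spec_card_game n out) := by unfold Spec_card_game; infer_instance

-- ===== CLAIM =====
def Claim_equal_card_game : Prop := ∀ (n : Int), Dom_card_game n → Pre_card_game n → Spec_card_game n (card_game n)

-- ===== LEMMAS AND PROOFS =====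

-- sum of the even-indexed / odd-indexed elements of a list
def evenAlt : List Int → Int
  | [] => 0
  | [x] => x
  | x :: _ :: r => x + evenAlt r

def oddAlt (L : List Int) : Int := evenAlt L.tail

theorem evenAlt_cons (x : Int) (r : List Int) : evenAlt (x :: r) = x + oddAlt r := by
  cases r <;> simp [evenAlt, oddAlt]

theorem oddAlt_cons (x : Int) (r : List Int) : oddAlt (x :: r) = evenAlt r := rfl

-- game arithmetic is ordinary % and / (positive divisors)
theorem mod2 (a : Int) : PySem.Int.mod a 2 = a % 2 := PySem.Int.mod_eq_emod_of_pos (by norm_num)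
theorem mod4 (a : Int) : PySem.Int.mod a 4 = a % 4 := PySem.Int.mod_eq_emod_of_pos (by norm_num)
theorem div2 (a : Int) : PySem.Int.floordiv a 2 = a / 2 := PySem.Int.floordiv_eq_ediv_of_pos (by norm_num)

-- buildA is fuel-irrelevant once fuel ≥ n
theorem buildA_fuel (f1 f2 : Nat) (n : Int) (h0 : 0 ≤ n)
    (h1 : n.toNat ≤ f1) (h2 : n.toNat ≤ f2) : buildA f1 n = buildA f2 n := by
  induction f1 using Nat.strong_induction_on generalizing f2 n with
  | _ f1 ih =>
    match f1, f2 with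
    | 0, f2 =>
      have hn : n = 0 := by omega
      subst hn
      cases f2 with
      | zero => rfl
      | succ f2 => simp [buildA]
    | f1 + 1, 0 =>
      have hn : n = 0 := by omega
      subst hn
      simp [buildA]
    | f1 + 1, f2 + 1 =>
      by_cases hn : n = 0
      · subst hn; simp [buildA]
      · have hpos : 0 < n := by omega
        unfold buildA
        rw [if_neg hn, if_neg hn]
        by_cases hc : PySem.Int.mod n 2 = 0 ∧ (PySem.Int.mod n 4 ≠ 0 ∨ n = 4)
        · rw [if_pos hc, if_pos hc]
          have hq := div2 n
          have h2' := (mod2 n) ▸ hc.1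
          rw [ih f1 (by omega) f2 (PySem.Int.floordiv n 2) (by omega) (by omega) (by omega)]
        · rw [if_neg hc, if_neg hc]
          rw [ih f1 (by omega) f2 (n - 1) (by omega) (by omega) (by omega)]

-- normalize buildA's fuel to the canonical n.toNat + 1
theorem buildA_norm (f : Nat) (n : Int) (h0 : 0 ≤ n) (hf : n.toNat ≤ f) :
    buildA f n = buildA (n.toNat + 1) n :=
  buildA_fuel f (n.toNat + 1) n h0 hf (by omega)

-- one unfolding of buildA at canonical fuel
theorem buildA_step (n : Int) (hn : n ≠ 0) :
    buildA (n.toNat + 1) n =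
      if PySem.Int.mod n 2 = 0 ∧ (PySem.Int.mod n 4 ≠ 0 ∨ n = 4) then
        PySem.Int.floordiv n 2 :: buildA n.toNat (PySem.Int.floordiv n 2)
      else
        1 :: buildA n.toNat (n - 1) := by
  conv_lhs => simp only [buildA]
  rw [if_neg hn]

-- core invariant: fB computes the even/odd-indexed sums of A's card list
theorem fB_eq (fuel : Nat) (n : Int) (h0 : 0 ≤ n) (hf : n.toNat ≤ fuel) :
    fB fuel n = (evenAlt (buildA (n.toNat + 1) n), oddAlt (buildA (n.toNat + 1) n)) := by
  induction fuel using Nat.strong_induction_on generalizing n with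
  | _ fuel ih =>
    match fuel with
    | 0 =>
      have hn : n = 0 := by omega
      subst hn
      simp [fB, buildA, evenAlt, oddAlt]
    | fuel + 1 =>
      by_cases hn : n = 0
      · subst hn; simp [fB, buildA, evenAlt, oddAlt]
      · have hpos : 0 < n := by omega
        rw [buildA_step n hn]
        unfold fB
        rw [if_neg hn]
        by_cases hodd : PySem.Int.mod n 2 = 1
        · -- odd n: one move of card 1
          have hA : ¬ (PySem.Int.mod n 2 = 0 ∧ (PySem.Int.mod n 4 ≠ 0 ∨ n = 4)) := by
            rw [mod2] at hodd ⊢; omega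
          rw [if_pos hodd, if_neg hA]
          dsimp only
          rw [buildA_norm n.toNat (n - 1) (by omega) (by omega)]
          rw [ih fuel (by omega) (n - 1) (by omega) (by omega)]
          rw [evenAlt_cons, oddAlt_cons]
        · rw [if_neg hodd]
          have heven : n % 2 = 0 := by rw [mod2] at hodd; omega
          by_cases hB : PySem.Int.mod n 4 = 2 ∨ n = 4
          · -- halving move
            have hA : PySem.Int.mod n 2 = 0 ∧ (PySem.Int.mod n 4 ≠ 0 ∨ n = 4) := by
              rw [mod2, mod4]; rw [mod4] at hB; omega
            rw [if_pos hB, if_pos hA]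
            dsimp only
            have hh : PySem.Int.floordiv n 2 = n / 2 := div2 n
            rw [buildA_norm n.toNat (PySem.Int.floordiv n 2) (by rw [hh]; omega)
              (by rw [hh]; omega)]
            rw [ih fuel (by omega) (PySem.Int.floordiv n 2) (by rw [hh]; omega)
              (by rw [hh]; omega)]
            rw [evenAlt_cons, oddAlt_cons]
          · -- n % 4 == 0, n ≠ 4, n ≥ 8: three moves 1, 1, (n-2)/2
            have h4 : n % 4 = 0 ∧ n ≠ 4 := by
              rw [mod4] at hB; omega
            have hn8 : 8 ≤ n := by omega
            have hA : ¬ (PySem.Int.mod n 2 = 0 ∧ (PySem.Int.mod n 4 ≠ 0 ∨ n = 4)) := by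
              rw [mod2, mod4]; omega
            rw [if_neg hB, if_neg hA]
            dsimp only
            -- second move: n - 1 is odd
            rw [buildA_norm n.toNat (n - 1) (by omega) (by omega)]
            have hn1 : (n - 1) ≠ 0 := by omega
            rw [buildA_step (n - 1) hn1]
            have hA1 : ¬ (PySem.Int.mod (n-1) 2 = 0 ∧ (PySem.Int.mod (n-1) 4 ≠ 0 ∨ n - 1 = 4)) := by
              rw [mod2, mod4]; omega
            rw [if_neg hA1]
            -- third move: n - 2 ≡ 2 (mod 4), halve
            rw [buildA_norm (n - 1).toNat (n - 1 - 1) (by omega) (by omega)]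
            have hs : n - 1 - 1 = n - 2 := by ring
            rw [hs]
            have hn2 : (n - 2) ≠ 0 := by omega
            rw [buildA_step (n - 2) hn2]
            have hA2 : PySem.Int.mod (n-2) 2 = 0 ∧ (PySem.Int.mod (n-2) 4 ≠ 0 ∨ n - 2 = 4) := by
              rw [mod2, mod4]; omega
            rw [if_pos hA2]
            have hh : PySem.Int.floordiv (n - 2) 2 = (n - 2) / 2 := div2 (n - 2)
            rw [buildA_norm (n - 2).toNat (PySem.Int.floordiv (n - 2) 2)
              (by rw [hh]; omega) (by rw [hh]; omega)]
            rw [ih fuel (by omega) (PySem.Int.floordiv (n - 2) 2) (by rw [hh]; omega)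
              (by rw [hh]; omega)]
            rw [evenAlt_cons, oddAlt_cons, evenAlt_cons, oddAlt_cons,
              evenAlt_cons, oddAlt_cons]
            simp only [Prod.mk.injEq]
            exact ⟨by ring, trivial⟩

-- A's strided sum over range(0, len, 2) is exactly evenAlt
theorem strideSum_evenAlt (L : List Int) :
    (PySem.List.pyRange 0 (L.length : Int) 2).foldl
      (fun acc c => acc + PySem.List.pyGetD L c 0) 0 = evenAlt L := by
  induction L using evenAlt.induct with
  | case1 => simp [PySem.List.pyRange_of_pos 0 0 (by norm_num : (0:Int) < 2), evenAlt]
  | case2 x =>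
    rw [show ((([x] : List Int).length : Int)) = 1 by simp]
    rw [PySem.List.pyRange_of_pos 0 1 (by norm_num : (0:Int) < 2)]
    norm_num [PySem.List.pyGetD_zero, evenAlt]
  | case3 x y r ihr =>
    rw [PySem.List.foldl_add, PySem.List.pyRange_of_pos 0 _ (by norm_num : (0:Int) < 2)]
    rw [PySem.List.foldl_add, PySem.List.pyRange_of_pos 0 _ (by norm_num : (0:Int) < 2)] at ihr
    have hlen : ((x :: y :: r).length : Int) = (r.length : Int) + 2 := by
      simp; omega
    rw [hlen]
    have hcnt : (if (0:Int) < (r.length:Int) + 2 then ((((r.length:Int) + 2) - 0 + 2 - 1) / 2).toNat else 0)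
        = (if (0:Int) < (r.length:Int) then (((r.length:Int) - 0 + 2 - 1) / 2).toNat else 0) + 1 := by
      by_cases hr : (0:Int) < (r.length:Int)
      · simp only [hr, if_true, if_pos (by omega : (0:Int) < (r.length:Int) + 2)]
        omega
      · have hr0 : (r.length : Int) = 0 := by omega
        simp [hr0]
    rw [hcnt, List.range_succ_eq_map]
    simp only [List.map_cons, List.map_map, List.sum_cons]
    have hget0 : PySem.List.pyGetD (x :: y :: r) (0 + 2 * ((0:Nat):Int)) 0 = x := by
      norm_num [PySem.List.pyGetD_zero]
    rw [hget0]
    have hmap : ∀ k : Nat,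
        PySem.List.pyGetD (x :: y :: r) (0 + 2 * ((k + 1 : Nat) : Int)) 0
          = PySem.List.pyGetD r (0 + 2 * ((k : Nat) : Int)) 0 := by
      intro k
      have h1 : (0 : Int) + 2 * ((k + 1 : Nat) : Int) = ((2 * k + 2 : Nat) : Int) := by
        push_cast; ring
      have h2 : (0 : Int) + 2 * ((k : Nat) : Int) = ((2 * k : Nat) : Int) := by
        push_cast; ring
      rw [h1, h2, PySem.List.pyGetD_natCast, PySem.List.pyGetD_natCast]
      simp
    simp only [List.map_map, Function.comp_def] at ihr
    simp only [Function.comp_def, hmap]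
    rw [evenAlt]
    linarith [ihr]

-- ===== VERDICT =====
theorem card_game_spec : Claim_equal_card_game := by
  intro n _ hpre
  unfold Spec_card_game card_game card_game_alt
  rw [strideSum_evenAlt, fB_eq (n.toNat + 1) n hpre (by omega)]
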